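-- pv_equiv track=rewrite | github.com/zxgsy520/gffvert | seq_add_function.py | get_best_gene
-- ===== SOURCE A (Python) =====
-- def get_best_gene(gstr):
--
--     r = ""
--     for i in gstr.split(","):
--         if not i:
--             continue
--         if len(i) <= 4 or len(i) >5:
--             continue
--         r = i
--
--     return r
-- ===== SOURCE B (Python) =====
-- def get_best_gene(gstr):
--     return next((i for i in reversed(gstr.split(",")) if len(i) == 5), "")
-- ===== Notes on version B (the rewrite author's own statement) =====
-- stated objective: idiomatic
-- what changed: Replaces A's forward full scan that keeps overwriting a last-match accumulator with an early-terminating first-match search over the reversed token list (next over a generator), with no accumulator.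
import Mathlib
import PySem

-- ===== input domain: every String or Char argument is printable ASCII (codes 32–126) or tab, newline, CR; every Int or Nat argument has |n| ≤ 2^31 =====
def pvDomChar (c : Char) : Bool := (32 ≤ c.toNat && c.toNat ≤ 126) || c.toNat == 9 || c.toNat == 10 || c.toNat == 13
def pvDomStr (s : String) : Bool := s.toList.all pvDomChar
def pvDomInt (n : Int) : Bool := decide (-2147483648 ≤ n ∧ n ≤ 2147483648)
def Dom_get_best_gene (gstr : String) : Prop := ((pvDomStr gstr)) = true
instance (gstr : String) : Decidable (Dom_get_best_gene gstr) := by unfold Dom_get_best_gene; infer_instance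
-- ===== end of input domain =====

-- B replaces A's forward accumulate-last scan with an early-terminating first-match
-- search over the reversed token list (idiomatic `next(...)`); equivalence proved on all inputs.


-- ===== PORT A =====
-- forward loop: keep the last token whose length lies outside neither bound
def get_best_gene (gstr : String) : String :=
  ((PySem.Str.split? gstr ",").getD []).foldl
    (fun r i =>
      if i = "" then r
      else if PySem.Str.len i ≤ 4 ∨ PySem.Str.len i > 5 then r
      else i) ""

-- ===== PORT B =====
-- first token of length exactly 5 in the reversed token list, default ""
def get_best_gene_alt (gstr : String) : String :=
  (((PySem.Str.split? gstr ",").getD []).reverse.find?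
    (fun i => PySem.Str.len i == 5)).getD ""

-- ===== PRECONDITION & SPEC =====
def Spec_get_best_gene (gstr : String) (out : String) : Prop := out = get_best_gene_alt gstr
instance (gstr : String) (out : String) : Decidable (Spec_get_best_gene gstr out) := by unfold Spec_get_best_gene; infer_instance

-- ===== CLAIM (what is proved, stated in full; the proofs are below) =====
def Claim_equal_get_best_gene : Prop := ∀ (gstr : String), Dom_get_best_gene gstr → Spec_get_best_gene gstr (get_best_gene gstr)

-- ===== LEMMAS AND PROOFS =====

-- one step of A's loop equals the "if length 5 then take it" update
theorem pv_step_eq (r a : String) :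
    (if a = "" then r
     else if PySem.Str.len a ≤ 4 ∨ PySem.Str.len a > 5 then r
     else a)
    = (if (PySem.Str.len a == 5) = true then a else r) := by
  simp only [PySem.Str.len_eq, beq_iff_eq]
  by_cases h0 : a = ""
  · subst h0; simp
  · simp only [h0, if_false]
    split_ifs with h1 h2 h2 <;> first | rfl | omega

-- forward last-match fold = first match of the reversed list (with default r)
theorem pv_fold_eq (L : List String) (r : String) :
    L.foldl (fun r i =>
      if i = "" then r
      else if PySem.Str.len i ≤ 4 ∨ PySem.Str.len i > 5 then r
      else i) r
    = (L.reverse.find? (fun i => PySem.Str.len i == 5)).getD r := by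
  induction L generalizing r with
  | nil => simp
  | cons a L ih =>
    simp only [List.foldl_cons, List.reverse_cons, List.find?_append]
    rw [ih]
    cases hf : L.reverse.find? (fun i => PySem.Str.len i == 5) with
    | some x => simp
    | none =>
      rw [pv_step_eq]
      simp only [PySem.Str.len_eq]
      cases h : (((a.length : Int)) == 5) <;> simp [List.find?, h]

-- ===== VERDICT (by name: the statement is the Claim_ definition above) =====
theorem get_best_gene_spec : Claim_equal_get_best_gene := by
  intro gstr _
  unfold Spec_get_best_gene get_best_gene get_best_gene_alt
  exact pv_fold_eq _ ""
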